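-- pv_equiv track=rewrite | github.com/davelab6/telaro | src/dash2/media/t9.py | getLastWord
-- ===== SOURCE A (Python) =====
-- def getLastWord(txt):
--     length = len(txt) - 1
--     word = ''
--     while length >= 0:
--         c = txt[length]
--         if not c.isalnum():
--             break
--         word = c + word
--         length -= 1
--     return word
-- ===== SOURCE B (Python) =====
-- def getLastWord(txt):
--     word = ''
--     for c in txt:
--         if c.isalnum():
--             word += c
--         else:
--             word = ''
--     return word
-- ===== Notes on version B (the rewrite author's own statement) =====
-- stated objective: alternative
-- what changed: B replaces A's backward scan with early break (which rebuilds the word by quadratic string prepending) by a single forward pass that appends alphanumeric characters and resets the accumulator on any non-alphanumeric character.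
import Mathlib
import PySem

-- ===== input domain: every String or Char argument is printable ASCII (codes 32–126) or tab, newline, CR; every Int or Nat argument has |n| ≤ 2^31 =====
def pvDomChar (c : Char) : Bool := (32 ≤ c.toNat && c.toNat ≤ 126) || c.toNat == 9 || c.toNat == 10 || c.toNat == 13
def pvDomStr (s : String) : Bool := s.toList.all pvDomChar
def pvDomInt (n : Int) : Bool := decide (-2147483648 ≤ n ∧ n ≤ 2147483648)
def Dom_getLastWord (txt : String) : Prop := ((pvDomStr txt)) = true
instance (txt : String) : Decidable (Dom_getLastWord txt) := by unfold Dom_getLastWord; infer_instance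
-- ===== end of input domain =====

-- B scans forward and resets the accumulator on a non-alphanumeric character,
-- instead of A's backward scan with early break and quadratic string prepending; a timing run measured B faster.

-- ===== PORT A =====
-- A's while-loop: index 'length' walks down from len-1; here n = length+1, so n = 0 is 'length < 0'.
def pvLoopA (cs : List Char) : Nat → List Char → List Char
  | 0, word => word
  | n+1, word =>
    match cs[n]? with
    | none => word            -- unreachable: the loop starts at len-1 and only decreases
    | some c =>
      if !(PySem.Chars.isalnum c) then word
      else pvLoopA cs n (c :: word)

def getLastWord (txt : String) : String :=
  String.ofList (pvLoopA txt.toList txt.toList.length [])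

-- ===== PORT B =====
def getLastWord_alt (txt : String) : String :=
  String.ofList (txt.toList.foldl (fun word c => if PySem.Chars.isalnum c then word ++ [c] else []) [])

-- ===== PRECONDITION & SPEC =====
def Spec_getLastWord (txt : String) (out : String) : Prop := out = getLastWord_alt txt
instance (txt : String) (out : String) : Decidable (Spec_getLastWord txt out) := by unfold Spec_getLastWord; infer_instance

-- ===== CLAIM (what is proved, stated in full; the proofs are below) =====
def Claim_equal_getLastWord : Prop := ∀ (txt : String), Dom_getLastWord txt → Spec_getLastWord txt (getLastWord txt)

-- ===== LEMMAS AND PROOFS =====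

-- ===== VERDICT (by name: the statement is the Claim_ definition above) =====
-- pvLoopA only reads indices < n, so an appended last element is invisible while n ≤ ds.length
theorem pvLoopA_append_stable (ds : List Char) (c : Char) :
    ∀ (n : Nat), n ≤ ds.length → ∀ (w : List Char), pvLoopA (ds ++ [c]) n w = pvLoopA ds n w := by
  intro n
  induction n with
  | zero => intro _ w; rfl
  | succ m ih =>
    intro h w
    have hm : m < ds.length := h
    simp only [pvLoopA, List.getElem?_append_left hm]
    cases hg : ds[m]? with
    | none => simp at hg; omega
    | some d =>
      by_cases hd : PySem.Chars.isalnum d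
      · simp [hd, ih (Nat.le_of_lt hm)]
      · simp [hd]

-- the backward loop started at ds.length equals the forward reset-fold, modulo the accumulator
theorem pvLoopA_eq_foldl (ds : List Char) :
    ∀ (w : List Char), pvLoopA ds ds.length w =
      (ds.foldl (fun word c => if PySem.Chars.isalnum c then word ++ [c] else []) []) ++ w := by
  induction ds using List.reverseRecOn with
  | nil => intro w; rfl
  | append_singleton ds c ih =>
    intro w
    have hlen : (ds ++ [c]).length = ds.length + 1 := by simp
    rw [hlen]
    simp only [pvLoopA, List.getElem?_append_right (Nat.le_refl ds.length), Nat.sub_self]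
    by_cases hc : PySem.Chars.isalnum c
    · simp only [List.getElem?_cons_zero, hc, Bool.not_true, Bool.false_eq_true, if_false,
        List.foldl_append, List.foldl_cons, List.foldl_nil, if_true]
      rw [pvLoopA_append_stable ds c ds.length (Nat.le_refl _), ih]
      simp
    · simp [hc]

-- ===== VERDICT (by name: the statement is the Claim_ definition above) =====
theorem getLastWord_spec : Claim_equal_getLastWord := by
  intro txt _
  unfold Spec_getLastWord getLastWord getLastWord_alt
  rw [pvLoopA_eq_foldl]
  simp
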